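-- pv_equiv track=rewrite | github.com/johnwroge/DSA | Algorithms/string-algorithms/z-algorithm.py | z_algorithm_2d
-- ===== SOURCE A (Python) =====
-- def z_algorithm(s):
--     """
--     Z-Algorithm: Compute Z-array for string s
--
--     Z[i] = length of longest substring starting from s[i]
--            which is also a prefix of s
--
--     Time: O(n), Space: O(n)
--     """
--     n = len(s)
--     if n == 0:
--         return []
--
--     z = [0] * n
--     z[0] = n  # By definition, entire string matches with itself
--
--     left = right = 0  # Window [left, right] of rightmost match
--
--     for i in range(1, n):
--         if i <= right:
--             # We're inside a previous match window
--             # z[i - left] is the Z-value for corresponding position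
--             z[i] = min(right - i + 1, z[i - left])
--
--         # Try to extend the match
--         while i + z[i] < n and s[z[i]] == s[i + z[i]]:
--             z[i] += 1
--
--         # Update the window if we found a match extending further right
--         if i + z[i] - 1 > right:
--             left = i
--             right = i + z[i] - 1
--
--     return z
--
-- def z_algorithm_2d(matrix):
--     """
--     2D version of Z-algorithm for 2D pattern matching
--
--     For each row, compute Z-array, then extend to 2D
--     """
--     if not matrix or not matrix[0]:
--         return []
--
--     rows, cols = len(matrix), len(matrix[0])
--     result = []
--
--     for i in range(rows):
--         # Convert row to string and compute Z-array
--         row_string = ''.join(matrix[i])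
--         z_row = z_algorithm(row_string)
--         result.append(z_row)
--
--     return result
-- ===== SOURCE B (Python) =====
-- def z_algorithm_2d(matrix):
--     """2D Z-arrays: naive per-row Z computation by direct prefix comparison."""
--     if not matrix or not matrix[0]:
--         return []
--     return [_naive_z(''.join(row)) for row in matrix]
--
-- def _naive_z(s):
--     n = len(s)
--     if n == 0:
--         return []
--     z = [n]
--     for i in range(1, n):
--         k = 0
--         while i + k < n and s[k] == s[i + k]:
--             k += 1
--         z.append(k)
--     return z
-- ===== Notes on version B (the rewrite author's own statement) =====
-- stated objective: simpler
-- what changed: The per-row Z-array helper's sliding-window (left/right) O(n) algorithm is replaced by a naive direct prefix count for each position, with no window state; the 2D wrapper is unchanged.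
import Mathlib
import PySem

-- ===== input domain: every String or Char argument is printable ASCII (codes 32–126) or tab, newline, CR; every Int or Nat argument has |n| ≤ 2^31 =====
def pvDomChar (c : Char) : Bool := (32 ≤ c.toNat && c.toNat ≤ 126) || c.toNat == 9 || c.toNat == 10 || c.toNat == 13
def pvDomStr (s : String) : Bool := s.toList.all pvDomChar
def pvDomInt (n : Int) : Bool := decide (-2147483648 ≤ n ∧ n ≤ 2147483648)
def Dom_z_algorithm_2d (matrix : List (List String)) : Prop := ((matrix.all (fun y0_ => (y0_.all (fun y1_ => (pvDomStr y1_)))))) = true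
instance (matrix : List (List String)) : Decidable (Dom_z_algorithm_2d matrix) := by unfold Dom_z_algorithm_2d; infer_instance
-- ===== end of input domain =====

-- B replaces the O(n) sliding-window Z-array helper by a naive direct prefix count per position (simpler: no left/right window state); the 2D wrapper is unchanged.

-- ===== PORT A =====
-- ''.join(row) as a character list (join with empty separator = concatenation, exact); shared verbatim by both ports.
def pvRowChars (row : List String) : List Char := (row.map String.toList).flatten

-- the `while i + z < n and s[z] == s[i + z]: z += 1` loop of BOTH Pythons (A starts it at the seeded z[i], B at 0); indices are in range when the guard holds, so getD is exact
def pvExt (cs : List Char) (i : Nat) (k : Nat) : Nat :=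
  if h : i + k < cs.length ∧ cs.getD k ' ' = cs.getD (i + k) ' ' then pvExt cs i (k + 1) else k
termination_by cs.length - (i + k)
decreasing_by omega

-- one iteration of A's `for i in range(1, n)` body: seed z[i] from the window, extend, update the window
def pvStepA (cs : List Char) (st : List Nat × Nat × Nat) (i : Nat) : List Nat × Nat × Nat :=
  let z := st.1
  let l := st.2.1
  let r := st.2.2
  let z1 := if i ≤ r then z.set i (min (r - i + 1) (z.getD (i - l) 0)) else z
  let zi := pvExt cs i (z1.getD i 0)
  let z2 := z1.set i zi
  if r < i + zi - 1 then (z2, i, i + zi - 1) else (z2, l, r)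

-- A's z_algorithm(s): z = [0]*n, z[0] = n, left = right = 0, then the indexed loop
def pvZA (cs : List Char) : List Int :=
  let n := cs.length
  if n = 0 then []
  else (((List.range' 1 (n - 1)).foldl (pvStepA cs) ((List.replicate n 0).set 0 n, 0, 0)).1).map Int.ofNat

def z_algorithm_2d (matrix : List (List String)) : List (List Int) :=
  if matrix.headD [] = [] then []
  else matrix.map (fun row => pvZA (pvRowChars row))

-- ===== PORT B =====
-- B's _naive_z(s): z = [n], then append the naive count for each i in range(1, n)
def pvZB (cs : List Char) : List Int :=
  let n := cs.length
  if n = 0 then []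
  else ((List.range' 1 (n - 1)).foldl (fun z i => z ++ [pvExt cs i 0]) [n]).map Int.ofNat

def z_algorithm_2d_alt (matrix : List (List String)) : List (List Int) :=
  if matrix.headD [] = [] then []
  else matrix.map (fun row => pvZB (pvRowChars row))

-- ===== PRECONDITION & SPEC =====
def Spec_z_algorithm_2d (matrix : List (List String)) (out : List (List Int)) : Prop := out = z_algorithm_2d_alt matrix
instance (matrix : List (List String)) (out : List (List Int)) : Decidable (Spec_z_algorithm_2d matrix out) := by unfold Spec_z_algorithm_2d; infer_instance

-- ===== CLAIM (what is proved, stated in full; the proofs are below) =====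
def Claim_equal_z_algorithm_2d : Prop := ∀ (matrix : List (List String)), Dom_z_algorithm_2d matrix → Spec_z_algorithm_2d matrix (z_algorithm_2d matrix)

-- ===== LEMMAS AND PROOFS =====

-- the mathematical Z-value: length of the longest common prefix of cs and cs.drop i
def pvLcp : List Char → List Char → Nat
  | a :: as, b :: bs => if a = b then pvLcp as bs + 1 else 0
  | _, _ => 0

def pvZ (cs : List Char) (i : Nat) : Nat := pvLcp cs (cs.drop i)

theorem pvLcp_le_right (a b : List Char) : pvLcp a b ≤ b.length := by
  induction a generalizing b with
  | nil => simp [pvLcp]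
  | cons x xs ih =>
    cases b with
    | nil => simp [pvLcp]
    | cons y ys => simp only [pvLcp]; split <;> simp [Nat.succ_le_succ (ih ys)]

theorem pvLcp_getD (a b : List Char) (j : Nat) (d : Char) (h : j < pvLcp a b) :
    a.getD j d = b.getD j d := by
  induction a generalizing b j with
  | nil => simp [pvLcp] at h
  | cons x xs ih =>
    cases b with
    | nil => simp [pvLcp] at h
    | cons y ys =>
      simp only [pvLcp] at h
      split at h
      · cases j with
        | zero => simpa using ‹x = y›
        | succ j' => simpa using ih ys j' (by omega)
      · omega

theorem pvLcp_stop (a b : List Char) (d : Char) (ha : pvLcp a b < a.length)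
    (hb : pvLcp a b < b.length) : a.getD (pvLcp a b) d ≠ b.getD (pvLcp a b) d := by
  induction a generalizing b with
  | nil => simp at ha
  | cons x xs ih =>
    cases b with
    | nil => simp at hb
    | cons y ys =>
      by_cases hxy : x = y
      · subst hxy
        have e : pvLcp (x :: xs) (x :: ys) = pvLcp xs ys + 1 := by simp [pvLcp]
        rw [e] at ha hb ⊢
        simp only [List.length_cons] at ha hb
        simpa using ih ys (by omega) (by omega)
      · simp only [pvLcp, if_neg hxy] at ha hb ⊢
        simpa using hxy

theorem pvLcp_ge (a b : List Char) (m : Nat) (d : Char) (ha : m ≤ a.length) (hb : m ≤ b.length)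
    (h : ∀ j < m, a.getD j d = b.getD j d) : m ≤ pvLcp a b := by
  induction a generalizing b m with
  | nil => simp at ha ⊢; omega
  | cons x xs ih =>
    cases b with
    | nil => simp at hb; omega
    | cons y ys =>
      cases m with
      | zero => omega
      | succ m' =>
        have h0 := h 0 (by omega)
        simp at h0
        simp only [pvLcp, h0, if_true]
        have := ih ys m' (by simpa using ha) (by simpa using hb)
          (fun j hj => by simpa using h (j + 1) (by omega))
        omega

theorem pvLcp_self (a : List Char) : pvLcp a a = a.length := by
  induction a with
  | nil => simp [pvLcp]
  | cons x xs ih => simp [pvLcp, ih]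

theorem pvZ_zero (cs : List Char) : pvZ cs 0 = cs.length := by
  simp [pvZ, pvLcp_self]

theorem pvZ_le (cs : List Char) (i : Nat) : pvZ cs i ≤ cs.length - i := by
  simpa using pvLcp_le_right cs (cs.drop i)

theorem getD_drop (l : List Char) (i j : Nat) (d : Char) :
    (l.drop i).getD j d = l.getD (i + j) d := by
  simp [List.getD, List.getElem?_drop]

-- characters inside the common prefix match across the shift i
theorem pvZ_match (cs : List Char) (i j : Nat) (h : j < pvZ cs i) :
    cs.getD j ' ' = cs.getD (i + j) ' ' := by
  have := pvLcp_getD cs (cs.drop i) j ' ' h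
  rwa [getD_drop] at this

-- the while loop, started at any k ≤ the true Z-value, computes exactly the true Z-value
theorem pvExt_eq (cs : List Char) (i k : Nat) (hk : k ≤ pvZ cs i) : pvExt cs i k = pvZ cs i := by
  rcases Nat.lt_or_ge k (pvZ cs i) with h | h
  · rw [pvExt]
    have hin : i + k < cs.length := by
      have := pvZ_le cs i
      omega
    rw [dif_pos ⟨hin, pvZ_match cs i k h⟩]
    exact pvExt_eq cs i (k + 1) (by omega)
  · have hk' : k = pvZ cs i := by omega
    subst hk'
    rw [pvExt]
    rw [dif_neg]
    rintro ⟨hin, heq⟩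
    have h1 : pvZ cs i < cs.length := by omega
    have h2 : pvZ cs i < (cs.drop i).length := by simp; omega
    have := pvLcp_stop cs (cs.drop i) ' ' h1 h2
    rw [getD_drop] at this
    exact this heq
termination_by pvZ cs i - k

-- the seed min(right - i + 1, z[i - left]) never overshoots the true Z-value
theorem pvSeed_le (cs : List Char) (l i r : Nat) (h1 : 1 ≤ l) (hl : l < i) (hir : i ≤ r)
    (hr : r < l + pvZ cs l) (hrn : r < cs.length) :
    min (r - i + 1) (pvZ cs (i - l)) ≤ pvZ cs i := by
  set m := min (r - i + 1) (pvZ cs (i - l)) with hm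
  have hmle : m ≤ r - i + 1 := Nat.min_le_left _ _
  have hmz : m ≤ pvZ cs (i - l) := Nat.min_le_right _ _
  have : m ≤ pvLcp cs (cs.drop i) := by
    apply pvLcp_ge cs (cs.drop i) m ' '
    · omega
    · simp; omega
    · intro j hj
      rw [getD_drop]
      have e1 : cs.getD j ' ' = cs.getD ((i - l) + j) ' ' := pvZ_match cs (i - l) j (by omega)
      have e2 : cs.getD ((i - l) + j) ' ' = cs.getD (l + ((i - l) + j)) ' ' :=
        pvZ_match cs l ((i - l) + j) (by omega)
      have e3 : l + ((i - l) + j) = i + j := by omega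
      rw [e1, e2, e3]
  simpa [pvZ] using this

-- helper: getD of the canonical partial-Z list
theorem getD_zlist (cs : List Char) (m j : Nat) :
    ((List.range cs.length).map (fun t => if t < m then pvZ cs t else 0)).getD j 0
      = if j < cs.length then (if j < m then pvZ cs j else 0) else 0 := by
  rcases Nat.lt_or_ge j cs.length with h | h
  · rw [PySem.List.getD_map_range _ _ _ _ h, if_pos h]
  · rw [if_neg (by omega)]
    apply List.getD_eq_default
    simpa using h

theorem set_zlist (cs : List Char) (i : Nat) (_hi : i < cs.length) :
    (((List.range cs.length).map (fun t => if t < i then pvZ cs t else 0)).set i (pvZ cs i))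
      = (List.range cs.length).map (fun t => if t < i + 1 then pvZ cs t else 0) := by
  apply List.ext_getElem
  · simp
  · intro j h1 h2
    simp only [List.getElem_set, List.getElem_map, List.getElem_range] at *
    split
    · rename_i hji; subst hji; simp
    · rename_i hji
      have : (j < i) ↔ (j < i + 1) := by omega
      simp only [this]

-- the loop invariant for A's fold
def pvInv (cs : List Char) (i : Nat) (st : List Nat × Nat × Nat) : Prop :=
  st.1 = (List.range cs.length).map (fun t => if t < i then pvZ cs t else 0)
  ∧ ((st.2.1 = 0 ∧ st.2.2 = 0)
     ∨ (1 ≤ st.2.1 ∧ st.2.1 < i ∧ st.2.2 < st.2.1 + pvZ cs st.2.1 ∧ st.2.2 < cs.length))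

theorem pvStepA_inv (cs : List Char) (i : Nat) (st : List Nat × Nat × Nat)
    (h1 : 1 ≤ i) (h2 : i < cs.length) (hinv : pvInv cs i st) :
    pvInv cs (i + 1) (pvStepA cs st i) := by
  obtain ⟨hz, hw⟩ := hinv
  obtain ⟨z, l, r⟩ := st
  simp only at hz hw
  unfold pvStepA pvInv
  simp only
  have hzin : pvZ cs i ≤ cs.length - i := pvZ_le cs i
  by_cases hir : i ≤ r
  · -- inside the window
    rw [if_pos hir]
    have hwin : 1 ≤ l ∧ l < i ∧ r < l + pvZ cs l ∧ r < cs.length := by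
      rcases hw with ⟨hl0, hr0⟩ | hw
      · omega
      · exact hw
    obtain ⟨hl1, hli, hrz, hrn⟩ := hwin
    have hzl : z.getD (i - l) 0 = pvZ cs (i - l) := by
      rw [hz, getD_zlist]
      rw [if_pos (by omega), if_pos (by omega)]
    set seed := min (r - i + 1) (z.getD (i - l) 0) with hseed
    have hseedle : seed ≤ pvZ cs i := by
      rw [hseed, hzl]
      exact pvSeed_le cs l i r hl1 hli hir hrz hrn
    have hget : (z.set i seed).getD i 0 = seed := by
      have : i < z.length := by rw [hz]; simpa using h2
      simp [List.getD, this]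
    rw [hget, pvExt_eq cs i seed hseedle]
    have hzset : (z.set i seed).set i (pvZ cs i)
        = (List.range cs.length).map (fun t => if t < i + 1 then pvZ cs t else 0) := by
      rw [List.set_set, hz]
      exact set_zlist cs i h2
    by_cases hcond : r < i + pvZ cs i - 1
    · rw [if_pos hcond]
      refine ⟨hzset, Or.inr ⟨h1, ?_, ?_, ?_⟩⟩ <;> dsimp only <;> omega
    · rw [if_neg hcond]
      refine ⟨hzset, Or.inr ⟨hl1, ?_, hrz, hrn⟩⟩
      dsimp only
      omega
  · -- outside the window: the stored z[i] is still 0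
    rw [if_neg hir]
    have hget : z.getD i 0 = 0 := by
      rw [hz, getD_zlist, if_pos h2, if_neg (by omega)]
    rw [hget, pvExt_eq cs i 0 (Nat.zero_le _)]
    have hzset : z.set i (pvZ cs i)
        = (List.range cs.length).map (fun t => if t < i + 1 then pvZ cs t else 0) := by
      rw [hz]; exact set_zlist cs i h2
    by_cases hcond : r < i + pvZ cs i - 1
    · rw [if_pos hcond]
      refine ⟨hzset, Or.inr ⟨h1, ?_, ?_, ?_⟩⟩ <;> dsimp only <;> omega
    · rw [if_neg hcond]
      refine ⟨hzset, ?_⟩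
      rcases hw with ⟨hl0, hr0⟩ | hw
      · exact Or.inl ⟨hl0, hr0⟩
      · obtain ⟨ha, hb, hc, hd⟩ := hw
        refine Or.inr ⟨ha, ?_, hc, hd⟩
        dsimp only
        omega

theorem pvFoldA_inv (cs : List Char) (m : Nat) (hm : m + 1 ≤ cs.length) :
    pvInv cs (m + 1) ((List.range' 1 m).foldl (pvStepA cs) ((List.replicate cs.length 0).set 0 cs.length, 0, 0)) := by
  induction m with
  | zero =>
    constructor
    · simp only [List.range'_zero, List.foldl_nil]
      apply List.ext_getElem
      · simp
      · intro j h1 h2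
        simp only [List.getElem_set, List.getElem_map, List.getElem_range,
          List.getElem_replicate] at *
        rcases Nat.eq_zero_or_pos j with hj | hj
        · subst hj; simp [pvZ_zero]
        · rw [if_neg (by omega), if_neg (by omega)]
    · left; exact ⟨rfl, rfl⟩
  | succ m ih =>
    rw [List.range'_1_concat, List.foldl_append, List.foldl_cons, List.foldl_nil]
    have hprev := ih (by omega)
    have hstep := pvStepA_inv cs (1 + m) _ (by omega) (by omega)
      (by simpa [Nat.add_comm 1 m] using hprev)
    simpa [Nat.add_comm 1 m] using hstep

-- the two Z-array helpers agree
theorem pvZA_eq_pvZB (cs : List Char) : pvZA cs = pvZB cs := by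
  unfold pvZA pvZB
  rcases Nat.eq_zero_or_pos cs.length with h0 | h0
  · simp [h0]
  · rw [if_neg (by omega), if_neg (by omega)]
    have hAz := (pvFoldA_inv cs (cs.length - 1) (by omega)).1
    rw [Nat.sub_add_cancel h0] at hAz
    rw [hAz, PySem.List.foldl_append_singleton_eq_map]
    have hr : List.range cs.length = 0 :: List.range' 1 (cs.length - 1) := by
      rcases Nat.exists_eq_add_of_le h0 with ⟨k, hk⟩
      rw [List.range_eq_range', hk, Nat.add_comm 1 k, List.range'_succ]
      simp
    rw [hr]
    simp only [List.map_cons, List.map_map, List.singleton_append]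
    refine List.cons_eq_cons.mpr ⟨?_, ?_⟩
    · simp [pvZ_zero, h0]
    · apply List.map_congr_left
      intro i hi
      have hmem := List.mem_range'_1.mp hi
      simp only [Function.comp_apply]
      rw [pvExt_eq cs i 0 (Nat.zero_le _), if_pos (by omega)]

-- ===== VERDICT (by name: the statement is the Claim_ definition above) =====
theorem z_algorithm_2d_spec : Claim_equal_z_algorithm_2d := by
  intro matrix _
  unfold Spec_z_algorithm_2d z_algorithm_2d z_algorithm_2d_alt
  split
  · rfl
  · exact List.map_congr_left (fun row _ => pvZA_eq_pvZB (pvRowChars row))
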